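-- pv_equiv track=rewrite | github.com/Shadow-tab/SmartFlow-AI | modules/input_preprocessing.py | validate_location
-- ===== SOURCE A (Python) =====
-- VALID_LOCATIONS = [
--     "Police_HQ",
--     "Traffic_Control_Center",
--     "River_Bridge",
--     "North_Station",
--     "Central_Junction",
--     "East_Market",
--     "Stadium",
--     "Airport_Road",
--     "City_Hospital",
--     "South_Residential",
--     "West_Terminal",
--     "Fire_Station",
--     "Industrial_Zone",
-- ]
--
-- def validate_location(location_value, field_name):
--     """
--     Checks that the given location exists in the predefined city
--     graph node list. Returns the clean location string or raises
--     a ValueError if unknown.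
--     """
--     cleaned = str(location_value).strip()
--
--     # Direct match — exact name like "City_Hospital"
--     if cleaned in VALID_LOCATIONS:
--         return cleaned
--
--     # Try case-insensitive match for convenience
--     for valid_loc in VALID_LOCATIONS:
--         if valid_loc.lower() == cleaned.lower():
--             return valid_loc
--
--     raise ValueError(
--         f"Unknown location for '{field_name}': '{location_value}'. "
--         f"Valid locations: {VALID_LOCATIONS}"
--     )
-- ===== SOURCE B (Python) =====
-- VALID_LOCATIONS = [
--     "Police_HQ",
--     "Traffic_Control_Center",
--     "River_Bridge",
--     "North_Station",
--     "Central_Junction",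
--     "East_Market",
--     "Stadium",
--     "Airport_Road",
--     "City_Hospital",
--     "South_Residential",
--     "West_Terminal",
--     "Fire_Station",
--     "Industrial_Zone",
-- ]
--
-- # built once: (lowered name, canonical name) pairs, sorted by lowered name
-- _SORTED = sorted((loc.lower(), loc) for loc in VALID_LOCATIONS)
--
-- def _lookup(key):
--     """Binary search (bisect_left) over _SORTED; canonical name or None."""
--     lo, hi = 0, len(_SORTED)
--     while lo < hi:
--         mid = (lo + hi) // 2
--         if _SORTED[mid][0] < key:
--             lo = mid + 1
--         else:
--             hi = mid
--     if lo < len(_SORTED) and _SORTED[lo][0] == key: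
--         return _SORTED[lo][1]
--     return None
--
-- def validate_location(location_value, field_name):
--     canon = _lookup(str(location_value).strip().lower())
--     if canon is not None:
--         return canon
--     raise ValueError(
--         f"Unknown location for '{field_name}': '{location_value}'. "
--         f"Valid locations: {VALID_LOCATIONS}"
--     )
-- ===== Notes on version B (the rewrite author's own statement) =====
-- stated objective: alternative
-- what changed: A's exact-membership branch plus case-insensitive linear scan are replaced by a hand-written binary search (bisect_left loop) over a module-level (lowered, canonical) pair list sorted once.
import Mathlib
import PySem

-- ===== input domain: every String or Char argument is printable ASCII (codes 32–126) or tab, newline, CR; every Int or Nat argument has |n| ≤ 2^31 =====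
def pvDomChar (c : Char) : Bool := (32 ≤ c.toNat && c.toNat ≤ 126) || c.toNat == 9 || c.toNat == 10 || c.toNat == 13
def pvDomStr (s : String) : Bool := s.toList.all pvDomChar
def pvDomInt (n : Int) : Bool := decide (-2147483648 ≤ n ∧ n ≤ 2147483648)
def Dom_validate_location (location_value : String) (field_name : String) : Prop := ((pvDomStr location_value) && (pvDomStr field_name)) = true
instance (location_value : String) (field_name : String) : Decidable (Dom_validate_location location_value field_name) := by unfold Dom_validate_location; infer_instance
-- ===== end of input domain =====

-- B replaces A's exact-membership branch plus case-insensitive linear scan by a binary search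
-- (bisect_left) over a module-level list of (lowered, canonical) pairs sorted once (objective: alternative).

-- ===== PORT A =====
def VALID_LOCATIONS : List String := ["Police_HQ", "Traffic_Control_Center", "River_Bridge", "North_Station", "Central_Junction", "East_Market", "Stadium", "Airport_Road", "City_Hospital", "South_Residential", "West_Terminal", "Fire_Station", "Industrial_Zone"]

-- A's for-loop: first valid_loc whose lower() equals cleaned.lower(); none = fall through to the raise
def ciScan (cleaned : String) : List String → Option String
  | [] => none
  | v :: rest => if PySem.Str.lower v == PySem.Str.lower cleaned then some v else ciScan cleaned rest

def validate_location (location_value : String) (_field_name : String) : String :=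
  let cleaned := PySem.Str.strip location_value
  if VALID_LOCATIONS.contains cleaned then cleaned
  else
    match ciScan cleaned VALID_LOCATIONS with
    | some v => v
    | none => ""  -- raise ValueError(...): excluded by Pre_

-- ===== PORT B =====
-- module-level: _SORTED = sorted((loc.lower(), loc) for loc in VALID_LOCATIONS)  (tuples sort lexicographically)
-- Python sorts/compares str by code points: ported via '<' on .toList (exact per PYSEM str COMPARISON);
-- the second tuple component never decides the order here (lowered keys are distinct)
def SORTED_PAIRS : List (String × String) :=
  PySem.List.sorted2 (VALID_LOCATIONS.map (fun loc => (PySem.Str.lower loc, loc))) (fun p => p.1.toList) (fun p => p.2.toList)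

-- Source B's 'while lo < hi' bisect_left loop; fuel = hi - lo bounds the iterations (each step shrinks
-- the interval, so the fuel never runs out on the initial call below); indices are in [lo, hi) ⊆ range
def bsearchLo (key : String) : Nat → Nat → Nat → Nat
  | 0, lo, _ => lo
  | fuel + 1, lo, hi =>
    if lo < hi then
      let mid := (lo + hi) / 2
      if (SORTED_PAIRS.getD mid ("", "")).1.toList < key.toList then bsearchLo key fuel (mid + 1) hi
      else bsearchLo key fuel lo mid
    else lo

-- Source B's _lookup: the bisect_left position, then the equality check
def lookupSorted (key : String) : Option String :=
  let lo := bsearchLo key SORTED_PAIRS.length 0 SORTED_PAIRS.length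
  if lo < SORTED_PAIRS.length then
    if (SORTED_PAIRS.getD lo ("", "")).1 == key then some (SORTED_PAIRS.getD lo ("", "")).2
    else none
  else none

def validate_location_alt (location_value : String) (_field_name : String) : String :=
  match lookupSorted (PySem.Str.lower (PySem.Str.strip location_value)) with
  | some canon => canon
  | none => ""  -- raise the identical ValueError: excluded by Pre_

-- ===== PRECONDITION & SPEC =====
-- Pre_ excludes exactly the unknown locations, on which A raises ValueError.
def Pre_validate_location (location_value : String) (field_name : String) : Prop :=
  PySem.Str.lower (PySem.Str.strip location_value) ∈ ["police_hq", "traffic_control_center", "river_bridge", "north_station", "central_junction", "east_market", "stadium", "airport_road", "city_hospital", "south_residential", "west_terminal", "fire_station", "industrial_zone"]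
instance (location_value : String) (field_name : String) : Decidable (Pre_validate_location location_value field_name) := by unfold Pre_validate_location; infer_instance

def pvWitness_validate_location : String × String := (" city_hospital ", "origin")

def Spec_validate_location (location_value : String) (field_name : String) (out : String) : Prop := out = validate_location_alt location_value field_name
instance (location_value : String) (field_name : String) (out : String) : Decidable (Spec_validate_location location_value field_name out) := by unfold Spec_validate_location; infer_instance

-- ===== CLAIM (what is proved, stated in full; the proofs are below) =====
def Claim_equal_validate_location : Prop := ∀ (location_value : String) (field_name : String), Dom_validate_location location_value field_name → Pre_validate_location location_value field_name → Spec_validate_location location_value field_name (validate_location location_value field_name)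

-- ===== LEMMAS AND PROOFS =====

-- both pipelines land on the canonical name once the scan and the binary search are pinned down;
-- the exact-match branch is absorbed because lower is injective on VALID_LOCATIONS (Nodup by decide)
theorem gen (lv fn : String) (canon : String)
    (hmem : canon ∈ VALID_LOCATIONS)
    (hlow : PySem.Str.lower (PySem.Str.strip lv) = PySem.Str.lower canon)
    (hscan : ciScan (PySem.Str.strip lv) VALID_LOCATIONS = some canon)
    (hfind : lookupSorted (PySem.Str.lower (PySem.Str.strip lv)) = some canon) :
    validate_location lv fn = validate_location_alt lv fn := by
  have hB : validate_location_alt lv fn = canon := by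
    unfold validate_location_alt; rw [hfind]
  have hA : validate_location lv fn = canon := by
    unfold validate_location
    dsimp only
    by_cases hm : PySem.Str.strip lv ∈ VALID_LOCATIONS
    · rw [if_pos (by simpa using hm)]
      exact List.inj_on_of_nodup_map (by decide) hm hmem hlow
    · rw [if_neg (by simpa using hm), hscan]
  rw [hA, hB]

set_option maxHeartbeats 1000000 in
theorem main (location_value field_name : String)
    (hPre : Pre_validate_location location_value field_name) :
    validate_location location_value field_name = validate_location_alt location_value field_name := by
  unfold Pre_validate_location at hPre
  simp only [List.mem_cons, List.not_mem_nil, or_false] at hPre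
  rcases hPre with hlow|hlow|hlow|hlow|hlow|hlow|hlow|hlow|hlow|hlow|hlow|hlow|hlow
  · exact gen location_value field_name "Police_HQ" (by decide) (by rw [hlow]; decide)
      (by simp [ciScan, VALID_LOCATIONS, hlow]; decide) (by rw [hlow]; decide)
  · exact gen location_value field_name "Traffic_Control_Center" (by decide) (by rw [hlow]; decide)
      (by simp [ciScan, VALID_LOCATIONS, hlow]; decide) (by rw [hlow]; decide)
  · exact gen location_value field_name "River_Bridge" (by decide) (by rw [hlow]; decide)
      (by simp [ciScan, VALID_LOCATIONS, hlow]; decide) (by rw [hlow]; decide)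
  · exact gen location_value field_name "North_Station" (by decide) (by rw [hlow]; decide)
      (by simp [ciScan, VALID_LOCATIONS, hlow]; decide) (by rw [hlow]; decide)
  · exact gen location_value field_name "Central_Junction" (by decide) (by rw [hlow]; decide)
      (by simp [ciScan, VALID_LOCATIONS, hlow]; decide) (by rw [hlow]; decide)
  · exact gen location_value field_name "East_Market" (by decide) (by rw [hlow]; decide)
      (by simp [ciScan, VALID_LOCATIONS, hlow]; decide) (by rw [hlow]; decide)
  · exact gen location_value field_name "Stadium" (by decide) (by rw [hlow]; decide)
      (by simp [ciScan, VALID_LOCATIONS, hlow]; decide) (by rw [hlow]; decide)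
  · exact gen location_value field_name "Airport_Road" (by decide) (by rw [hlow]; decide)
      (by simp [ciScan, VALID_LOCATIONS, hlow]; decide) (by rw [hlow]; decide)
  · exact gen location_value field_name "City_Hospital" (by decide) (by rw [hlow]; decide)
      (by simp [ciScan, VALID_LOCATIONS, hlow]; decide) (by rw [hlow]; decide)
  · exact gen location_value field_name "South_Residential" (by decide) (by rw [hlow]; decide)
      (by simp [ciScan, VALID_LOCATIONS, hlow]; decide) (by rw [hlow]; decide)
  · exact gen location_value field_name "West_Terminal" (by decide) (by rw [hlow]; decide)
      (by simp [ciScan, VALID_LOCATIONS, hlow]; decide) (by rw [hlow]; decide)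
  · exact gen location_value field_name "Fire_Station" (by decide) (by rw [hlow]; decide)
      (by simp [ciScan, VALID_LOCATIONS, hlow]; decide) (by rw [hlow]; decide)
  · exact gen location_value field_name "Industrial_Zone" (by decide) (by rw [hlow]; decide)
      (by simp [ciScan, VALID_LOCATIONS, hlow]; decide) (by rw [hlow]; decide)

-- ===== VERDICT (by name: the statement is the Claim_ definition above) =====
set_option maxHeartbeats 1000000 in
theorem validate_location_spec : Claim_equal_validate_location := by
  intro location_value field_name _ hPre
  unfold Spec_validate_location
  exact main location_value field_name hPre
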